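-- pv_equiv track=rewrite | github.com/LiuZhenshun/VideoMAE | dataset/gen_dataset_tmh.py | extract_overlaps
-- ===== SOURCE A (Python) =====
-- def extract_overlaps(intervals):
--     # Expand the intervals into individual events and sort them
--     events = sorted((t, startOrEnd, label) for start, end, label in intervals for t, startOrEnd in [(start, -1), (end, 1)])
--
--     interval = []
--     labels = set()
--
--     for i in range(1, len(events)):
--         t1, startOrEnd1, label1 = events[i - 1]
--         t2, _, _ = events[i]
--
--         if startOrEnd1 == -1:
--             labels.add(label1)
--         elif startOrEnd1 == 1 and label1 in labels:
--             labels.remove(label1)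
--
--         if t1 != t2 and labels:
--             interval.append((t1, t2, ','.join(sorted(labels))))
--
--         newIntervals = []
--         prevEnd = 0
--
--         for start, end, label in interval:
--             if start > prevEnd:
--                 newIntervals.append((prevEnd, start, 'normal'))
--             newIntervals.append((start, end, label))
--             prevEnd = end
--
--     return newIntervals
-- ===== SOURCE B (Python) =====
-- def extract_overlaps(intervals):
--     events = sorted((t, se, label) for start, end, label in intervals for t, se in [(start, -1), (end, 1)])
--
--     out = []
--     labels = set()
--     prev_t = None
--     prev_end = 0
--     for t, se, label in events:
--         if prev_t is not None and prev_t != t and labels: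
--             if prev_t > prev_end:
--                 out.append((prev_end, prev_t, 'normal'))
--             out.append((prev_t, t, ','.join(sorted(labels))))
--             prev_end = t
--         if se == -1:
--             labels.add(label)
--         else:
--             labels.discard(label)
--         prev_t = t
--     return out
-- ===== Notes on version B (the rewrite author's own statement) =====
-- stated objective: alternative
-- what changed: B fuses everything into a single pass over the sorted events with a (labels, prev_t, prev_end, out) accumulator that emits gap-filled output directly, instead of A's index-driven pair sweep that collects a segment list and rebuilds the whole gap-filled list from scratch inside every loop iteration.
import Mathlib
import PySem

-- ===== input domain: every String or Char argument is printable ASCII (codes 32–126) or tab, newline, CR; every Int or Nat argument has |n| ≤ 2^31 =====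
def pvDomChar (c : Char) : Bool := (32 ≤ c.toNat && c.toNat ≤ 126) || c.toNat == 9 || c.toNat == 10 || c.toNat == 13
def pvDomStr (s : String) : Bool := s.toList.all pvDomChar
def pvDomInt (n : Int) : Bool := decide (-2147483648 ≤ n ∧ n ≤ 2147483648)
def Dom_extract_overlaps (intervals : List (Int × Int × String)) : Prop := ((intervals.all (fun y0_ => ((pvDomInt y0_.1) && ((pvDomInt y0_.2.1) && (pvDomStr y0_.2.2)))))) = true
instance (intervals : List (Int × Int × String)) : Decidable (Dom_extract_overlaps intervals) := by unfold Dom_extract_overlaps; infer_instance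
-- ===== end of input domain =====

-- B replaces A's pair-indexed sweep (which rebuilds the whole gap-filled list inside every
-- iteration) by ONE fused pass over the sorted events that emits the gap-filled output
-- directly (objective: alternative — the per-iteration rebuild disappears).

-- ===== PORT A =====
-- shared by both ports: both Pythons start with the identical `sorted(... for ...)` event
-- expansion; ported once.
-- Python's lexicographic `<` on the 3-tuples (Int, Int, String):
def evLt (a b : Int × Int × String) : Bool :=
  a.1 < b.1 || (a.1 == b.1 && (a.2.1 < b.2.1 || (a.2.1 == b.2.1 && a.2.2 < b.2.2)))

-- sorted(xs) : the same stable insertion-sort shape as PySem.List.sorted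
-- (sorted_eq_foldl_insertBy), with the tuple-lexicographic `before`.
def sortEvents (xs : List (Int × Int × String)) : List (Int × Int × String) :=
  xs.foldl (fun acc x => PySem.List.insertBy evLt x acc) []

-- the generator `(t, se, label) for start, end, label in intervals for t, se in [...]`
def pyEvents (intervals : List (Int × Int × String)) : List (Int × Int × String) :=
  intervals.flatMap (fun iv => [(iv.1, -1, iv.2.2), (iv.2.1, 1, iv.2.2)])

-- A's inner gap-fill loop: newIntervals = [], prevEnd = 0; for start, end, label in interval: ...
def gapFill (segs : List (Int × Int × String)) : List (Int × Int × String) :=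
  (segs.foldl
    (fun (st : List (Int × Int × String) × Int) iv =>
      let acc := if iv.1 > st.2 then st.1 ++ [(st.2, iv.1, "normal")] else st.1
      (acc ++ [iv], iv.2.1))
    ([], 0)).1

-- body of A's sweep iteration, given events[i-1] and events[i]; state = (labels, interval, newIntervals).
def sweepStepA (st : PySem.Set String × List (Int × Int × String) × List (Int × Int × String))
    (e1 e2 : Int × Int × String) :
    PySem.Set String × List (Int × Int × String) × List (Int × Int × String) :=
  let labels :=
    if e1.2.1 == -1 then PySem.Set.add st.1 e1.2.2
    else if e1.2.1 == 1 && PySem.Set.contains st.1 e1.2.2 then PySem.Set.discard st.1 e1.2.2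
    else st.1
  let interval :=
    if e1.1 != e2.1 && !labels.isEmpty then
      st.2.1 ++ [(e1.1, e2.1, PySem.Str.join "," (PySem.List.sorted labels (fun x => x)))]
    else st.2.1
  (labels, interval, gapFill interval)

def extract_overlaps (intervals : List (Int × Int × String)) : List (Int × Int × String) :=
  let events := sortEvents (pyEvents intervals)
  let st := (PySem.List.pyRange 1 (PySem.List.len events)).foldl
    (fun st i =>
      sweepStepA st (PySem.List.pyGetD events (i - 1) (0, 0, ""))
                    (PySem.List.pyGetD events i (0, 0, "")))
    (PySem.Set.empty, [], [])
  st.2.2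

-- ===== PORT B =====
-- body of B's single fused loop over the events themselves;
-- state = (labels, prev_t, prev_end, out)
def stepB (st : PySem.Set String × Option Int × Int × List (Int × Int × String))
    (e : Int × Int × String) :
    PySem.Set String × Option Int × Int × List (Int × Int × String) :=
  let pe_out :=
    match st.2.1 with
    | none => (st.2.2.1, st.2.2.2)
    | some pt =>
      if pt != e.1 && !st.1.isEmpty then
        (e.1,
         (if pt > st.2.2.1 then st.2.2.2 ++ [(st.2.2.1, pt, "normal")] else st.2.2.2)
           ++ [(pt, e.1, PySem.Str.join "," (PySem.List.sorted st.1 (fun x => x)))])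
      else (st.2.2.1, st.2.2.2)
  let labels :=
    if e.2.1 == -1 then PySem.Set.add st.1 e.2.2 else PySem.Set.discard st.1 e.2.2
  (labels, some e.1, pe_out.1, pe_out.2)

def extract_overlaps_alt (intervals : List (Int × Int × String)) : List (Int × Int × String) :=
  let events := sortEvents (pyEvents intervals)
  (events.foldl stepB (PySem.Set.empty, none, 0, [])).2.2.2

-- ===== PRECONDITION & SPEC =====
-- On the empty list the Python A raises UnboundLocalError (newIntervals is never assigned).
def Pre_extract_overlaps (intervals : List (Int × Int × String)) : Prop := intervals ≠ []
instance (intervals : List (Int × Int × String)) : Decidable (Pre_extract_overlaps intervals) := by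
  unfold Pre_extract_overlaps; infer_instance

def pvWitness_extract_overlaps : (List (Int × Int × String)) := [(0, 2, "a")]

def Spec_extract_overlaps (intervals : List (Int × Int × String)) (out : List (Int × Int × String)) : Prop := out = extract_overlaps_alt intervals
instance (intervals : List (Int × Int × String)) (out : List (Int × Int × String)) : Decidable (Spec_extract_overlaps intervals out) := by unfold Spec_extract_overlaps; infer_instance

-- ===== CLAIM (what is proved, stated in full; the proofs are below) =====
def Claim_equal_extract_overlaps : Prop := ∀ (intervals : List (Int × Int × String)), Dom_extract_overlaps intervals → Pre_extract_overlaps intervals → Spec_extract_overlaps intervals (extract_overlaps intervals)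

-- ===== LEMMAS AND PROOFS =====

-- discarding an absent element is the identity
lemma discard_not_mem (l : PySem.Set String) (x : String)
    (h : PySem.Set.contains l x = false) : PySem.Set.discard l x = l := by
  apply List.filter_eq_self.mpr
  intro y hy
  have hx : x ∉ l := by simpa using h
  simp only [Bool.not_eq_eq_eq_not, Bool.not_true, beq_eq_false_iff_ne, ne_eq]
  rintro rfl
  exact hx hy

-- membership through sortEvents
lemma mem_sortEvents_foldl (xs acc : List (Int × Int × String)) (y : Int × Int × String) :
    y ∈ xs.foldl (fun acc x => PySem.List.insertBy evLt x acc) acc ↔ y ∈ acc ∨ y ∈ xs := by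
  induction xs generalizing acc with
  | nil => simp
  | cons x xs ih =>
    simp [List.foldl_cons, ih, PySem.List.mem_insertBy]
    tauto

lemma mem_sortEvents (xs : List (Int × Int × String)) (y : Int × Int × String) :
    y ∈ sortEvents xs ↔ y ∈ xs := by
  simpa using mem_sortEvents_foldl xs [] y

-- every event produced by pyEvents has second component -1 or 1
lemma pyEvents_flag (intervals : List (Int × Int × String)) (e : Int × Int × String)
    (h : e ∈ pyEvents intervals) : e.2.1 = -1 ∨ e.2.1 = 1 := by
  unfold pyEvents at h
  rw [List.mem_flatMap] at h
  obtain ⟨iv, -, hmem⟩ := h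
  simp only [List.mem_cons, List.not_mem_nil, or_false] at hmem
  rcases hmem with he | he <;> simp [he]

-- the index-driven fold over pyRange 1 len equals the fold over zip(es, es.tail)
lemma idx_fold_eq_pair_fold {S : Type} (es : List (Int × Int × String))
    (d : Int × Int × String)
    (f : S → (Int × Int × String) → (Int × Int × String) → S) (st0 : S) :
    (PySem.List.pyRange 1 (PySem.List.len es)).foldl
        (fun st i => f st (PySem.List.pyGetD es (i - 1) d) (PySem.List.pyGetD es i d)) st0
      = (es.zip es.tail).foldl (fun st p => f st p.1 p.2) st0 := by
  have hz : (es.zip es.tail).length = es.length - 1 := by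
    simp [List.length_zip, List.length_tail]
  rw [show (es.zip es.tail).foldl (fun st p => f st p.1 p.2) st0
        = (PySem.List.pyRange 0 (PySem.List.len (es.zip es.tail))).foldl
            (fun st j => f st (PySem.List.pyGetD (es.zip es.tail) j (d, d)).1
                              (PySem.List.pyGetD (es.zip es.tail) j (d, d)).2) st0
      from (PySem.List.foldl_pyRange_zero_pyGetD (es.zip es.tail) (d, d)
              (fun st p => f st p.1 p.2) st0).symm]
  rw [PySem.List.pyRange_one, PySem.List.pyRange_one, List.foldl_map, List.foldl_map]
  have hlen : ((PySem.List.len es : Int) - 1).toNat = ((PySem.List.len (es.zip es.tail) : Int) - 0).toNat := by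
    simp [PySem.List.len_eq, hz]
  rw [hlen]
  apply PySem.List.foldl_congr_mem
  intro st k hk
  have hk' : k < es.length - 1 := by
    have := List.mem_range.mp hk
    simp [PySem.List.len_eq, hz] at this
    omega
  have hk1 : k < es.length := by omega
  have hk2 : k + 1 < es.length := by omega
  have hkz : k < (es.zip es.tail).length := by omega
  have e0 : PySem.List.pyGetD es (1 + (k : Int) - 1) d = es[k] := by
    rw [show (1 : Int) + (k : Int) - 1 = ((k : Nat) : Int) by omega]
    simp [PySem.List.pyGetD_natCast, hk1]
  have e1 : PySem.List.pyGetD es (1 + (k : Int)) d = es[k + 1] := by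
    rw [show (1 : Int) + (k : Int) = ((k + 1 : Nat) : Int) by omega]
    rw [PySem.List.pyGetD_natCast, List.getD_eq_getElem _ _ hk2]
  have e2 : PySem.List.pyGetD (es.zip es.tail) (0 + (k : Int)) (d, d) = (es[k], es[k + 1]) := by
    rw [show (0 : Int) + (k : Int) = ((k : Nat) : Int) by omega]
    rw [PySem.List.pyGetD_natCast, List.getD_eq_getElem _ _ hkz, List.getElem_zip]
    congr 1
    rw [List.getElem_tail]
  rw [e0, e1, e2]

-- proof-local canonical forms shared by the two equivalence directions
def applyFlag (e : Int × Int × String) (l : PySem.Set String) : PySem.Set String :=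
  if e.2.1 == -1 then PySem.Set.add l e.2.2 else PySem.Set.discard l e.2.2

def emitSeg (l : PySem.Set String) (pt t : Int) : List (Int × Int × String) :=
  if pt != t && !l.isEmpty then
    [(pt, t, PySem.Str.join "," (PySem.List.sorted l (fun x => x)))]
  else []

def segsOf (l : PySem.Set String) (pt : Int) : List (Int × Int × String) → List (Int × Int × String)
  | [] => []
  | e :: rest => emitSeg l pt e.1 ++ segsOf (applyFlag e l) e.1 rest

def gstep (st : List (Int × Int × String) × Int) (iv : Int × Int × String) :
    List (Int × Int × String) × Int :=
  ((if iv.1 > st.2 then st.1 ++ [(st.2, iv.1, "normal")] else st.1) ++ [iv], iv.2.1)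

lemma gapFill_eq (segs : List (Int × Int × String)) :
    gapFill segs = (segs.foldl gstep ([], 0)).1 := rfl

-- A's labels update equals applyFlag on ±1-flagged events
lemma labelsA_eq (e : Int × Int × String) (l : PySem.Set String)
    (h : e.2.1 = -1 ∨ e.2.1 = 1) :
    (if e.2.1 == -1 then PySem.Set.add l e.2.2
     else if e.2.1 == 1 && PySem.Set.contains l e.2.2 then PySem.Set.discard l e.2.2
     else l) = applyFlag e l := by
  unfold applyFlag
  rcases h with h | h
  · simp [h]
  · rcases hc : PySem.Set.contains l e.2.2 with hc | hc
    · simp [h, discard_not_mem l e.2.2 hc]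
    · simp [h]

-- A's pair fold computes segsOf, with the gap-filled list rebuilt at each step
lemma A_fold (rest : List (Int × Int × String)) :
    ∀ (e : Int × Int × String) (l : PySem.Set String)
      (segs nI : List (Int × Int × String)),
      (∀ x ∈ e :: rest, x.2.1 = -1 ∨ x.2.1 = 1) →
      ∃ L, ((e :: rest).zip rest).foldl (fun st p => sweepStepA st p.1 p.2) (l, segs, nI)
        = (L, segs ++ segsOf (applyFlag e l) e.1 rest,
           if rest.isEmpty then nI else gapFill (segs ++ segsOf (applyFlag e l) e.1 rest)) := by
  induction rest with
  | nil => intro e l segs nI _; exact ⟨l, by simp [segsOf]⟩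
  | cons f rest' ih =>
    intro e l segs nI hflag
    have hstep : sweepStepA (l, segs, nI) e f
        = (applyFlag e l, segs ++ emitSeg (applyFlag e l) e.1 f.1,
           gapFill (segs ++ emitSeg (applyFlag e l) e.1 f.1)) := by
      unfold sweepStepA emitSeg
      rw [labelsA_eq e l (hflag e (by simp))]
      cases hc : (e.1 != f.1 && !(applyFlag e l).isEmpty) <;> simp [hc]
    obtain ⟨L, hL⟩ := ih f (applyFlag e l)
      (segs ++ emitSeg (applyFlag e l) e.1 f.1)
      (gapFill (segs ++ emitSeg (applyFlag e l) e.1 f.1))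
      (fun x hx => hflag x (by simp at hx ⊢; tauto))
    refine ⟨L, ?_⟩
    rw [List.zip_cons_cons, List.foldl_cons, hstep, hL]
    simp only [segsOf, List.append_assoc]
    cases rest' <;> simp [segsOf]

-- B's fused fold computes the gap-fill of segsOf directly
lemma B_fold (es : List (Int × Int × String)) :
    ∀ (l : PySem.Set String) (pt pe : Int) (out : List (Int × Int × String)),
      ∃ L PT, es.foldl stepB (l, some pt, pe, out)
        = (L, PT, ((segsOf l pt es).foldl gstep (out, pe)).2,
                  ((segsOf l pt es).foldl gstep (out, pe)).1) := by
  induction es with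
  | nil => intro l pt pe out; exact ⟨l, some pt, by simp [segsOf]⟩
  | cons e rest ih =>
    intro l pt pe out
    have hstep : stepB (l, some pt, pe, out) e
        = (applyFlag e l, some e.1,
           ((emitSeg l pt e.1).foldl gstep (out, pe)).2,
           ((emitSeg l pt e.1).foldl gstep (out, pe)).1) := by
      unfold stepB emitSeg applyFlag gstep
      cases hc : (pt != e.1 && !l.isEmpty) <;> simp [hc]
    obtain ⟨L, PT, hL⟩ := ih (applyFlag e l) e.1
      ((emitSeg l pt e.1).foldl gstep (out, pe)).2
      ((emitSeg l pt e.1).foldl gstep (out, pe)).1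
    refine ⟨L, PT, ?_⟩
    rw [List.foldl_cons, hstep, hL]
    simp [segsOf, List.foldl_append]

-- ===== VERDICT (by name: the statement is the Claim_ definition above) =====
theorem extract_overlaps_spec : Claim_equal_extract_overlaps := by
  intro intervals _ _
  unfold Spec_extract_overlaps
  simp only [extract_overlaps, extract_overlaps_alt]
  have hflag : ∀ x ∈ sortEvents (pyEvents intervals), x.2.1 = -1 ∨ x.2.1 = 1 := fun x hx =>
    pyEvents_flag intervals x ((mem_sortEvents _ _).mp hx)
  rw [idx_fold_eq_pair_fold (sortEvents (pyEvents intervals)) (0, 0, "") sweepStepA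
        (PySem.Set.empty, [], [])]
  rcases hE : sortEvents (pyEvents intervals) with _ | ⟨e, rest⟩
  · simp
  · rw [hE] at hflag
    obtain ⟨L, hA⟩ := A_fold rest e PySem.Set.empty [] [] hflag
    have hB1 : stepB (PySem.Set.empty, none, 0, []) e
        = (applyFlag e PySem.Set.empty, some e.1, 0, []) := by
      unfold stepB applyFlag; rfl
    obtain ⟨L', PT', hB⟩ := B_fold rest (applyFlag e PySem.Set.empty) e.1 0 []
    rw [List.tail_cons, hA, List.foldl_cons, hB1, hB]
    simp only [List.nil_append]
    cases rest with
    | nil => simp [segsOf]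
    | cons f rest' => simp [gapFill_eq]
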